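-- pv_equiv track=rewrite | github.com/0Rogue0/pythonProject1 | firstTASK.py | f13
-- ===== SOURCE A (Python) =====
-- def f13(n):
--     p1 = 0
--     for i in range(1, n + 1):
--         p1 += (i ** 7 + i ** 8)
--
--     p2 = 0
--     for i in range(1, n + 1):
--         p2 += (i ** 8 + i ** 6)
--
--     return 12 * p1 - p2
-- ===== SOURCE B (Python) =====
-- def f13(n):
--     if n <= 0:
--         return 0
--     s6 = n*(n+1)*(2*n+1)*(3*n**4 + 6*n**3 - 3*n + 1) // 42
--     s7 = n*n*(n+1)*(n+1)*(3*n**4 + 6*n**3 - n*n - 4*n + 2) // 24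
--     s8 = n*(n+1)*(2*n+1)*(5*n**6 + 15*n**5 + 5*n**4 - 15*n**3 - n*n + 9*n - 3) // 90
--     return 12*s7 + 11*s8 - s6
-- ===== Notes on version B (the rewrite author's own statement) =====
-- stated objective: faster
-- what changed: Replaced the two O(n) accumulation loops by Faulhaber closed-form formulas for the sixth/seventh/eighth power sums (exact integer division), combining them in constant time.
import Mathlib
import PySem

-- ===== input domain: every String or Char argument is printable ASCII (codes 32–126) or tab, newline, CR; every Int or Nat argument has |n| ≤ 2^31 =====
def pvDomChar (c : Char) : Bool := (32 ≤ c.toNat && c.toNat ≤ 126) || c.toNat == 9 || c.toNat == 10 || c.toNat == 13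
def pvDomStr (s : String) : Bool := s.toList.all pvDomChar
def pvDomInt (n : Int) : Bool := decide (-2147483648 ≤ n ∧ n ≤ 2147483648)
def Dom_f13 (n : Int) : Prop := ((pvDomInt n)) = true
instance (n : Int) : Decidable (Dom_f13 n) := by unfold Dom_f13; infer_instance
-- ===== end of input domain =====

-- B replaces A's two O(n) loops by Faulhaber closed-form power-sum formulas, O(1).

-- ===== PORT A =====
def f13 (n : Int) : Int :=
  let p1 := (PySem.List.pyRange 1 (n + 1) 1).foldl (fun p i => p + (i ^ 7 + i ^ 8)) 0
  let p2 := (PySem.List.pyRange 1 (n + 1) 1).foldl (fun p i => p + (i ^ 8 + i ^ 6)) 0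
  12 * p1 - p2

-- ===== PORT B =====
def f13_alt (n : Int) : Int :=
  if n ≤ 0 then 0
  else
    let s6 := PySem.Int.floordiv (n * (n + 1) * (2 * n + 1) * (3 * n ^ 4 + 6 * n ^ 3 - 3 * n + 1)) 42
    let s7 := PySem.Int.floordiv (n * n * (n + 1) * (n + 1) * (3 * n ^ 4 + 6 * n ^ 3 - n * n - 4 * n + 2)) 24
    let s8 := PySem.Int.floordiv (n * (n + 1) * (2 * n + 1) * (5 * n ^ 6 + 15 * n ^ 5 + 5 * n ^ 4 - 15 * n ^ 3 - n * n + 9 * n - 3)) 90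
    12 * s7 + 11 * s8 - s6

-- ===== PRECONDITION & SPEC =====
def Spec_f13 (n : Int) (out : Int) : Prop := out = f13_alt n
instance (n : Int) (out : Int) : Decidable (Spec_f13 n out) := by unfold Spec_f13; infer_instance

-- ===== CLAIM (what is proved, stated in full; the proofs are below) =====
def Claim_equal_f13 : Prop := ∀ (n : Int), Dom_f13 n → Spec_f13 n (f13 n)

-- ===== LEMMAS AND PROOFS =====

/-- Sum of (j+1)^k for j < m, i.e. 1^k + … + m^k. -/
def pvSp (k m : Nat) : Int := ((List.range m).map (fun j => ((j : Int) + 1) ^ k)).sum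

theorem pvSp_succ (k m : Nat) : pvSp k (m + 1) = pvSp k m + ((m : Int) + 1) ^ k := by
  simp [pvSp, List.range_succ]

/-- A's loop over range(1, m+1) accumulating g equals the corresponding map-sum. -/
theorem pvLoop (g : Int → Int) (m : Nat) :
    (PySem.List.pyRange 1 ((m : Int) + 1) 1).foldl (fun p i => p + g i) 0
      = ((List.range m).map (fun j => g ((j : Int) + 1))).sum := by
  induction m with
  | zero =>
      rw [PySem.List.pyRange_one_eq_nil (by norm_num : ((0 : Nat) : Int) + 1 ≤ 1)]
      simp
  | succ m ih =>
      have h : ((m + 1 : Nat) : Int) + 1 = ((m : Int) + 1) + 1 := by push_cast; ring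
      rw [h, PySem.List.pyRange_one_succ_right (by omega), List.foldl_append, ih,
        List.range_succ]
      simp

theorem pvP6 (m : Nat) : 42 * pvSp 6 m =
    (m : Int) * ((m : Int) + 1) * (2 * (m : Int) + 1) *
      (3 * (m : Int) ^ 4 + 6 * (m : Int) ^ 3 - 3 * (m : Int) + 1) := by
  induction m with
  | zero => simp [pvSp]
  | succ m ih => rw [pvSp_succ]; push_cast; push_cast at ih; linear_combination ih

theorem pvP7 (m : Nat) : 24 * pvSp 7 m =
    (m : Int) * (m : Int) * ((m : Int) + 1) * ((m : Int) + 1) *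
      (3 * (m : Int) ^ 4 + 6 * (m : Int) ^ 3 - (m : Int) * (m : Int) - 4 * (m : Int) + 2) := by
  induction m with
  | zero => simp [pvSp]
  | succ m ih => rw [pvSp_succ]; push_cast; push_cast at ih; linear_combination ih

theorem pvP8 (m : Nat) : 90 * pvSp 8 m =
    (m : Int) * ((m : Int) + 1) * (2 * (m : Int) + 1) *
      (5 * (m : Int) ^ 6 + 15 * (m : Int) ^ 5 + 5 * (m : Int) ^ 4 - 15 * (m : Int) ^ 3
        - (m : Int) * (m : Int) + 9 * (m : Int) - 3) := by
  induction m with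
  | zero => simp [pvSp]
  | succ m ih => rw [pvSp_succ]; push_cast; push_cast at ih; linear_combination ih

theorem pvFloordiv_mul (c x : Int) (hc : 0 < c) : PySem.Int.floordiv (c * x) c = x := by
  rw [PySem.Int.floordiv_eq_ediv_of_pos hc]
  exact Int.mul_ediv_cancel_left x (by omega)


theorem pvSum_map_add (l : List Int) (f g : Int → Int) :
    (l.map (fun j => f j + g j)).sum = (l.map f).sum + (l.map g).sum := by
  induction l with
  | nil => simp
  | cons x xs ih => simp [ih]; ring

theorem pvSum_split (m a b : Nat) :
    ((List.range m).map (fun j => ((j : Int) + 1) ^ a + ((j : Int) + 1) ^ b)).sum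
      = pvSp a m + pvSp b m := by
  unfold pvSp
  exact pvSum_map_add _ _ _

-- ===== VERDICT (by name: the statement is the Claim_ definition above) =====
theorem f13_spec : Claim_equal_f13 := by
  intro n _
  unfold Spec_f13 f13 f13_alt
  by_cases hn : n ≤ 0
  · rw [PySem.List.pyRange_one_eq_nil (by omega)]
    simp [hn]
  · lift n to Nat using (by omega : (0:Int) ≤ n) with m
    rw [if_neg hn, pvLoop, pvLoop]
    have h6 := pvP6 m
    have h7 := pvP7 m
    have h8 := pvP8 m
    have e6 : PySem.Int.floordiv ((m : Int) * ((m : Int) + 1) * (2 * (m : Int) + 1) *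
        (3 * (m : Int) ^ 4 + 6 * (m : Int) ^ 3 - 3 * (m : Int) + 1)) 42 = pvSp 6 m := by
      rw [← h6]; exact pvFloordiv_mul 42 _ (by norm_num)
    have e7 : PySem.Int.floordiv ((m : Int) * (m : Int) * ((m : Int) + 1) * ((m : Int) + 1) *
        (3 * (m : Int) ^ 4 + 6 * (m : Int) ^ 3 - (m : Int) * (m : Int) - 4 * (m : Int) + 2)) 24
        = pvSp 7 m := by
      rw [← h7]; exact pvFloordiv_mul 24 _ (by norm_num)
    have e8 : PySem.Int.floordiv ((m : Int) * ((m : Int) + 1) * (2 * (m : Int) + 1) *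
        (5 * (m : Int) ^ 6 + 15 * (m : Int) ^ 5 + 5 * (m : Int) ^ 4 - 15 * (m : Int) ^ 3
          - (m : Int) * (m : Int) + 9 * (m : Int) - 3)) 90 = pvSp 8 m := by
      rw [← h8]; exact pvFloordiv_mul 90 _ (by norm_num)
    rw [e6, e7, e8]
    rw [pvSum_split m 7 8, pvSum_split m 8 6]
    ring
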